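-- pv_equiv track=rewrite | github.com/smohapatra1/scripting | python/practice/start_again/2023/07252023/valid_sudoku.py | NotInRow
-- ===== SOURCE A (Python) =====
-- def NotInRow(arr, row):
--     st=set()
--     for i in range(0,9):
--         # If already encountered before,
--         # return false
--         if arr[row][i] in st:
--             return False
--         # If it is not an empty cell, insert value
--         # at the current cell in the set
--         if arr[row][i] != '.':
--             st.add(arr[row][i])
--     return True
-- ===== SOURCE B (Python) =====
-- def NotInRow(arr, row):
--     cells = sorted(arr[row][:9])
--     for a, b in zip(cells, cells[1:]):
--         if a == b != '.':
--             return False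
--     return True
-- ===== Notes on version B (the rewrite author's own statement) =====
-- stated objective: alternative
-- what changed: Replaces A's early-exiting scan with a running membership set by sort-then-adjacent-compare: slice the first 9 cells, sort them so equal values become neighbours, and report a duplicate iff some adjacent pair is equal and not '.'.
import Mathlib
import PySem

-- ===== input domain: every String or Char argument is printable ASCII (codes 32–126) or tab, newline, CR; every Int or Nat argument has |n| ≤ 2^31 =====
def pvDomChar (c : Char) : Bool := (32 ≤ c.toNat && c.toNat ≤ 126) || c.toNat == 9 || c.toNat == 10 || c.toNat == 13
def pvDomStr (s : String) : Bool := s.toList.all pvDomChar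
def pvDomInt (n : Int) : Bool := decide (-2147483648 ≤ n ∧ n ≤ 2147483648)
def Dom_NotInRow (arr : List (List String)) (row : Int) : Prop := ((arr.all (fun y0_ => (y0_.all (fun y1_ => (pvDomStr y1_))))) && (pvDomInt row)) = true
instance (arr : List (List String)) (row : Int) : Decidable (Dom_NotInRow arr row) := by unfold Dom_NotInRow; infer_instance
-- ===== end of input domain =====

-- B replaces A's early-exiting scan with a running membership set by a sort-then-adjacent-compare
-- pass: sort the 9 cells so equal values become neighbours, then look for an adjacent equal pair
-- other than '.' (objective: alternative).

-- ===== PORT A =====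
-- the for-loop of A: scan the indices, early-return False on a repeat, add non-'.' cells to the set
def notInRowLoop (r : List String) : List Int → PySem.Set String → Bool
  | [], _ => true
  | i :: rest, st =>
    if PySem.Set.contains st (PySem.List.pyGetD r i "") then false
    else if PySem.List.pyGetD r i "" != "." then
      notInRowLoop r rest (PySem.Set.add st (PySem.List.pyGetD r i ""))
    else
      notInRowLoop r rest st

def NotInRow (arr : List (List String)) (row : Int) : Bool :=
  notInRowLoop (PySem.List.pyGetD arr row []) (PySem.List.pyRange 0 9 1) PySem.Set.empty

-- ===== PORT B =====
-- the zip(cells, cells[1:]) loop of B: early-return False on an adjacent equal non-'.' pair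
def adjCheck : List String → Bool
  | [] => true
  | a :: rest =>
    match rest with
    | [] => true
    | b :: _ => if a == b && b != "." then false else adjCheck rest

def NotInRow_alt (arr : List (List String)) (row : Int) : Bool :=
  let cells := PySem.List.sorted
    (PySem.List.slice (PySem.List.pyGetD arr row []) none (some 9)) (fun x => x) false
  adjCheck cells

-- ===== PRECONDITION & SPEC =====
-- Pre_ is exactly where the Python A returns: a valid row index, and either the row has at least 9
-- cells or its non-'.' cells contain a duplicate (so A's scan returns False before running off the
-- end); everywhere else A raises IndexError.
def Pre_NotInRow (arr : List (List String)) (row : Int) : Prop :=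
  PySem.Raise.InRange arr.length row ∧
    (9 ≤ (PySem.List.pyGetD arr row []).length ∨
      ¬ ((PySem.List.pyGetD arr row []).filter (fun c => c != ".")).Nodup)
instance (arr : List (List String)) (row : Int) : Decidable (Pre_NotInRow arr row) := by
  unfold Pre_NotInRow; infer_instance
def pvWitness_NotInRow : List (List String) × Int :=
  ([["5", "3", ".", ".", "7", ".", ".", ".", "."]], 0)

-- (On a valid row index whose row is shorter than 9 cells and whose non-'.' cells are all
-- distinct, A raises IndexError running off the end while B's slice truncates and B returns
-- True; those inputs are outside Pre_.)

def Spec_NotInRow (arr : List (List String)) (row : Int) (out : Bool) : Prop := out = NotInRow_alt arr row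
instance (arr : List (List String)) (row : Int) (out : Bool) : Decidable (Spec_NotInRow arr row out) := by unfold Spec_NotInRow; infer_instance

-- ===== CLAIM (what is proved, stated in full; the proofs are below) =====
def Claim_equal_NotInRow : Prop := ∀ (arr : List (List String)) (row : Int), Dom_NotInRow arr row → Pre_NotInRow arr row → Spec_NotInRow arr row (NotInRow arr row)

-- ===== LEMMAS AND PROOFS =====

-- A's loop only looks at the fetched cells: rephrase it over the cell list
def cellScan : List String → PySem.Set String → Bool
  | [], _ => true
  | c :: cs, st =>
    if PySem.Set.contains st c then false
    else if c != "." then cellScan cs (PySem.Set.add st c)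
    else cellScan cs st

theorem cellScan_eq (cs : List String) (st : PySem.Set String) (hdot : "." ∉ st) :
    cellScan cs st = decide ((cs.filter (fun c => c != ".")).Nodup
      ∧ ∀ x ∈ cs.filter (fun c => c != "."), x ∉ st) := by
  induction cs generalizing st with
  | nil => simp [cellScan]
  | cons c cs ih =>
    by_cases hc : c = "."
    · subst hc
      have h1 : PySem.Set.contains st "." = false := by simpa using hdot
      simp [cellScan, ih st hdot, hdot]
    · by_cases hmem : c ∈ st
      · have h1 : PySem.Set.contains st c = true := (PySem.Set.contains_iff st c).mpr hmem
        simp [cellScan, hc, hmem]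
      · have h1 : PySem.Set.contains st c = false := by
          simp only [PySem.Set.contains_eq_listContains]
          simpa using hmem
        have hadd := PySem.Set.add_of_not_mem hmem
        have hdot' : "." ∉ PySem.Set.add st c := by
          rw [hadd]; simp [hdot, Ne.symm hc]
        rw [cellScan, h1, if_neg (by simp), if_pos (by simp [hc]), ih _ hdot', hadd]
        simp only [decide_eq_decide, List.filter_cons, List.nodup_cons, List.mem_append,
          List.mem_filter, bne_iff_ne, ne_eq, hc, not_false_iff, if_pos, List.mem_cons]
        constructor
        · rintro ⟨hnd, hall⟩
          refine ⟨⟨fun h => hall c ⟨h.1, hc⟩ (Or.inr (Or.inl rfl)), hnd⟩, ?_⟩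
          intro x hx
          rcases hx with rfl | hx
          · exact hmem
          · exact fun hst => hall x hx (Or.inl hst)
        · rintro ⟨⟨hcf, hnd⟩, hall⟩
          refine ⟨hnd, fun x hx hor => ?_⟩
          rcases hor with hst | hxc | hnil
          · exact hall x (Or.inr hx) hst
          · exact hcf ⟨hxc ▸ hx.1, trivial⟩
          · simp at hnil

theorem notInRowLoop_eq_cellScan (r : List String) (is : List Int) (st : PySem.Set String) :
    notInRowLoop r is st = cellScan (is.map (fun i => PySem.List.pyGetD r i "")) st := by
  induction is generalizing st with
  | nil => rfl
  | cons i rest ih => simp [notInRowLoop, cellScan, ih]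

-- B's adjacent scan over a sorted list decides "no duplicate non-'.' cell"
theorem adjCheck_pairwise (l : List String) (hp : l.Pairwise (· ≤ ·)) :
    adjCheck l = decide ((l.filter (fun c => c != ".")).Nodup) := by
  induction l with
  | nil => simp [adjCheck]
  | cons a t ih =>
    cases t with
    | nil => by_cases h : a = "." <;> simp [adjCheck, h]
    | cons b rest =>
      have hab : a ≤ b := (List.pairwise_cons.mp hp).1 b (by simp)
      have harest : ∀ x ∈ rest, a ≤ x := fun x hx =>
        (List.pairwise_cons.mp hp).1 x (by simp [hx])
      have hp' : (b :: rest).Pairwise (· ≤ ·) := (List.pairwise_cons.mp hp).2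
      have hbrest : ∀ x ∈ rest, b ≤ x := (List.pairwise_cons.mp hp').1
      by_cases hdup : a = b ∧ b ≠ "."
      · obtain ⟨rfl, hbd⟩ := hdup
        have : adjCheck (a :: a :: rest) = false := by
          simp [adjCheck, hbd]
        rw [this]
        have : ¬ ((a :: a :: rest).filter (fun c => c != ".")).Nodup := by
          simp [hbd]
        simp [this]
      · have hstep : adjCheck (a :: b :: rest) = adjCheck (b :: rest) := by
          rw [adjCheck]
          rcases not_and_or.mp hdup with h | h
          · simp [h]
          · simp [not_not.mp h]
        rw [hstep, ih hp']
        by_cases ha : a = "."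
        · simp [List.filter_cons, ha]
        · have hne : a ≠ b := by
            intro h; exact hdup ⟨h, fun hb => ha (h.trans hb)⟩
          have hnotin : a ∉ b :: rest := by
            intro h
            rcases List.mem_cons.mp h with h1 | h1
            · exact hne h1
            · exact hne (le_antisymm hab (hbrest a h1))
          have hnotinf : a ∉ (b :: rest).filter (fun c => c != ".") := fun h =>
            hnotin (List.mem_of_mem_filter h)
          simp only [decide_eq_decide]
          have hfeq : (a :: b :: rest).filter (fun c => c != ".")
              = a :: (b :: rest).filter (fun c => c != ".") :=
            List.filter_cons_of_pos (by simp [ha])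
          rw [hfeq, List.nodup_cons]
          exact ⟨fun h => ⟨hnotinf, h⟩, fun h => h.2⟩

-- fetching indices 0..n-1 with default d is "take n, padded with d"
theorem map_getD_range (n : Nat) (r : List String) (d : String) :
    (List.range n).map (fun i => r.getD i d) = r.take n ++ List.replicate (n - r.length) d := by
  apply List.ext_getElem
  · simp; omega
  · intro i h1 h2
    simp only [List.length_map, List.length_range] at h1
    simp only [List.getElem_map, List.getElem_range]
    by_cases h : i < r.length
    · rw [List.getElem_append_left (by simp; omega)]
      simp [List.getD_eq_getElem?_getD, List.getElem?_eq_getElem (by simpa using h), List.getElem_take]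
    · rw [List.getElem_append_right (by simp; omega)]
      simp [List.getD_eq_getElem?_getD, List.getElem?_eq_none (by simpa using h)]

-- ===== VERDICT (by name: the statement is the Claim_ definition above) =====
theorem NotInRow_spec : Claim_equal_NotInRow := by
  intro arr row _ hpre
  obtain ⟨-, hpre2⟩ := hpre
  unfold Spec_NotInRow NotInRow NotInRow_alt
  dsimp only
  rw [notInRowLoop_eq_cellScan]
  have h0 : PySem.List.pyRange 0 9 1 = (List.range 9).map (fun n : Nat => (n : Int)) := by decide
  have hrange : (PySem.List.pyRange 0 9 1).map
      (fun i => PySem.List.pyGetD (PySem.List.pyGetD arr row []) i "")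
      = (PySem.List.pyGetD arr row []).take 9
          ++ List.replicate (9 - (PySem.List.pyGetD arr row []).length) "" := by
    rw [h0, List.map_map]
    have hc : ((fun i => PySem.List.pyGetD (PySem.List.pyGetD arr row []) i "") ∘
        (fun n : Nat => (n : Int))) = fun n : Nat => (PySem.List.pyGetD arr row []).getD n "" := by
      funext n; simp [Function.comp, PySem.List.pyGetD_natCast]
    rw [hc, map_getD_range]
  rw [hrange, cellScan_eq _ _ (by simp [PySem.Set.empty])]
  have hslice : PySem.List.slice (PySem.List.pyGetD arr row []) none (some 9)
      = (PySem.List.pyGetD arr row []).take 9 := by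
    simp [pysem]
  rw [hslice]
  have hsortp : (PySem.List.sorted ((PySem.List.pyGetD arr row []).take 9)
      (fun x => x) false).Pairwise (· ≤ ·) := PySem.List.sorted_pairwise _ _
  rw [adjCheck_pairwise _ hsortp]
  have hperm : (PySem.List.sorted ((PySem.List.pyGetD arr row []).take 9) (fun x => x) false).Perm
      ((PySem.List.pyGetD arr row []).take 9) := PySem.List.sorted_perm _ _ _
  have hnd := (hperm.filter (fun c => c != ".")).nodup_iff
  by_cases h9 : 9 ≤ (PySem.List.pyGetD arr row []).length
  · have hz : 9 - (PySem.List.pyGetD arr row []).length = 0 := by omega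
    simp [hz, PySem.Set.empty, hnd]
  · have hdup : ¬ ((PySem.List.pyGetD arr row []).filter (fun c => c != ".")).Nodup :=
      hpre2.resolve_left h9
    have htake : (PySem.List.pyGetD arr row []).take 9 = PySem.List.pyGetD arr row [] :=
      List.take_of_length_le (by omega)
    have hnd2 : ∀ (l2 : List String),
        ¬ (((PySem.List.pyGetD arr row []).take 9).filter (fun c => c != ".") ++ l2).Nodup := by
      intro l2 h
      exact hdup (htake ▸ (h.sublist (List.sublist_append_left _ _)))
    have hR : ¬ (List.filter (fun c => c != ".")
        (PySem.List.sorted ((PySem.List.pyGetD arr row []).take 9) (fun x => x) false)).Nodup :=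
      fun h => hdup (htake ▸ hnd.mp h)
    simp [PySem.Set.empty, hnd2, hR]
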